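-- pv_equiv track=rewrite | github.com/MrBrantCode/unitest_baseline | mut_generate/mist_train_cf/cf_69456/solution.py | boldWords
-- ===== SOURCE A (Python) =====
-- def boldWords(words, S):
--     mask = [0] * len(S)
--     for word in words:
--         start = S.find(word)
--         while start != -1:
--             mask[start:start+len(word)] = [1]*len(word)
--             start = S.find(word, start + 1)
--
--     output = []
--     for i in range(len(S)):
--         if mask[i] and (i == 0 or not mask[i-1]):
--             output.append("<b>")
--         output.append(S[i])
--         if mask[i] and (i == len(S)-1 or not mask[i+1]):
--             output.append("</b>")
--     return "".join(output)
-- ===== SOURCE B (Python) =====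
-- def boldWords(words, S):
--     # single forward sweep: at each position extend the furthest match end; emit tags on bold-state changes
--     n = len(S)
--     out = []
--     end = 0          # furthest end of any match starting at an index <= current i
--     prev = False     # was the previous character bold?
--     for i in range(n):
--         for w in words:
--             if S.startswith(w, i) and i + len(w) > end:
--                 end = i + len(w)
--         cur = i < end
--         if cur and not prev:
--             out.append("<b>")
--         elif prev and not cur:
--             out.append("</b>")
--         out.append(S[i])
--         prev = cur
--     if prev:
--         out.append("</b>")
--     return "".join(out)
-- ===== Notes on version B (the rewrite author's own statement) =====
-- stated objective: alternative
-- what changed: Replaces A's two-stage mask construction (repeated str.find per word filling a 0/1 array, then a second rendering pass with lookahead/lookbehind into the mask) by a single forward sweep that tracks the furthest end of any match starting at or before the current index and emits <b>/</b> on bold-state transitions, with no mask array and no second pass.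
import Mathlib
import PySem

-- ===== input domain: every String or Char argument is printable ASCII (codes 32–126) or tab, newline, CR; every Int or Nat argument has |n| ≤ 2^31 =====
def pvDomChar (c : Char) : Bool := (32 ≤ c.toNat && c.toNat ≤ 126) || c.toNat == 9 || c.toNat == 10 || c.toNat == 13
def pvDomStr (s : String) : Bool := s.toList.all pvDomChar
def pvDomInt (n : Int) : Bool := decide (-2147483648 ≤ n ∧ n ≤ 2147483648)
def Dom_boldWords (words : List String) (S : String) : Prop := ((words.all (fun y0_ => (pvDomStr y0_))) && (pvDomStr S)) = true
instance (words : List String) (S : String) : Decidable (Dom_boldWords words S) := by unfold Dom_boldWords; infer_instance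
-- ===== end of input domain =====

-- B replaces A's two-pass algorithm (0/1 mask filled by repeated str.find per word, then a rendering
-- pass with mask lookahead/lookbehind) by a single forward sweep tracking the furthest match end and
-- emitting tags on bold-state transitions (objective: alternative, same asymptotic cost).

-- ===== PORT A =====
-- Python slice assignment  mask[start:start+l] = [1]*l  (exact: Python's slice clamping on both bounds)
def pvSliceAssign (mask : List Int) (start : Int) (l : Nat) : List Int :=
  PySem.List.slice mask none (some start) ++ List.replicate l 1 ++ PySem.List.slice mask (some (start + l)) none

-- A's inner 'while start != -1' loop; the fuel only makes the loop total (find results strictly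
-- increase and stay ≤ len(S), so the fuel passed below is never exhausted)
def pvFindLoop (cs w : List Char) (mask : List Int) (start : Int) : Nat → List Int
  | 0 => mask
  | fuel + 1 =>
    if start = -1 then mask
    else pvFindLoop cs w (pvSliceAssign mask start w.length) (PySem.Chars.findFrom cs w (start + 1) none) fuel

-- A's 'for word in words' building the mask
def pvMask (cs : List Char) (words : List (List Char)) : List Int :=
  words.foldl (fun m w => pvFindLoop cs w m (PySem.Chars.find cs w) (cs.length + 2)) (List.replicate cs.length 0)

-- A's 'for i in range(len(S))' rendering loop (mask[i-1] / mask[i+1] are only read under A's guards)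
def pvRenderA (cs : List Char) (mask : List Int) (k : Nat) : List String :=
  if h : k < cs.length then
    (if PySem.List.pyGetD mask (k : Int) 0 ≠ 0 ∧ (k = 0 ∨ ¬ PySem.List.pyGetD mask ((k : Int) - 1) 0 ≠ 0)
      then ["<b>"] else [])
    ++ [String.ofList [cs[k]]]
    ++ (if PySem.List.pyGetD mask (k : Int) 0 ≠ 0 ∧ (k = cs.length - 1 ∨ ¬ PySem.List.pyGetD mask ((k : Int) + 1) 0 ≠ 0)
      then ["</b>"] else [])
    ++ pvRenderA cs mask (k + 1)
  else []
termination_by cs.length - k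

def boldWords (words : List String) (S : String) : String :=
  PySem.Str.join "" (pvRenderA S.toList (pvMask S.toList (words.map String.toList)) 0)

-- ===== PORT B =====
-- S.startswith(w, i)  (exact for the 0 ≤ i ≤ len(S) this port reaches)
def pvStartsAt (cs w : List Char) (i : Nat) : Bool := PySem.Chars.startswith (cs.drop i) w

-- B's inner 'for w in words': extend the furthest match end
def pvExtend (cs : List Char) (words : List (List Char)) (i : Nat) (e : Nat) : Nat :=
  words.foldl (fun e w => if pvStartsAt cs w i = true ∧ e < i + w.length then i + w.length else e) e

-- B's single sweep: state = furthest match end e and previous bold flag prev; final close after the loop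
def pvRenderB (cs : List Char) (words : List (List Char)) (k : Nat) (e : Nat) (prev : Bool) : List String :=
  if h : k < cs.length then
    (if decide (k < pvExtend cs words k e) = true ∧ ¬ prev = true then ["<b>"]
      else if prev = true ∧ ¬ decide (k < pvExtend cs words k e) = true then ["</b>"] else [])
    ++ [String.ofList [cs[k]]]
    ++ pvRenderB cs words (k + 1) (pvExtend cs words k e) (decide (k < pvExtend cs words k e))
  else if prev = true then ["</b>"] else []
termination_by cs.length - k

def boldWords_alt (words : List String) (S : String) : String :=
  PySem.Str.join "" (pvRenderB S.toList (words.map String.toList) 0 0 false)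

-- ===== PRECONDITION & SPEC =====
def Spec_boldWords (words : List String) (S : String) (out : String) : Prop := out = boldWords_alt words S
instance (words : List String) (S : String) (out : String) : Decidable (Spec_boldWords words S out) := by unfold Spec_boldWords; infer_instance

-- ===== CLAIM (what is proved, stated in full; the proofs are below) =====
def Claim_equal_boldWords : Prop := ∀ (words : List String) (S : String), Dom_boldWords words S → Spec_boldWords words S (boldWords words S)

-- ===== LEMMAS AND PROOFS =====

-- the predicate both programs decide at each position: some word occurrence covers index i
def pvCovered (cs : List Char) (words : List (List Char)) (i : Nat) : Prop :=
  ∃ w ∈ words, ∃ j, j ≤ i ∧ i < j + w.length ∧ w <+: cs.drop j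

-- B's loop invariant: e bounds every match end seen so far, and e is 0 or itself such an end
def pvInv (cs : List Char) (words : List (List Char)) (k e : Nat) : Prop :=
  (∀ w ∈ words, ∀ j, j < k → w <+: cs.drop j → j + w.length ≤ e) ∧
  (e = 0 ∨ ∃ w ∈ words, ∃ j, j < k ∧ w <+: cs.drop j ∧ e = j + w.length)

theorem pvSliceAssign_eq (mask : List Int) (n l : Nat) :
    pvSliceAssign mask (n : Int) l = mask.take n ++ List.replicate l 1 ++ mask.drop (n + l) := by
  unfold pvSliceAssign
  rw [PySem.List.slice_to_natCast]
  have : ((n : Int) + (l : Int)) = ((n + l : Nat) : Int) := by push_cast; ring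
  rw [this, PySem.List.slice_from_natCast]

theorem pvSliceAssign_length (mask : List Int) (n l : Nat) (h : n + l ≤ mask.length) :
    (pvSliceAssign mask (n : Int) l).length = mask.length := by
  rw [pvSliceAssign_eq]
  simp [List.length_take, List.length_drop]
  omega

theorem pvSliceAssign_getD (mask : List Int) (n l : Nat) (h : n + l ≤ mask.length) (i : Nat) :
    (pvSliceAssign mask (n : Int) l).getD i 0 =
      if n ≤ i ∧ i < n + l then 1 else mask.getD i 0 := by
  rw [pvSliceAssign_eq, List.append_assoc]
  have hlt : (mask.take n).length = n := by simp; omega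
  rcases lt_or_ge i n with hi | hi
  · rw [if_neg (by omega), List.getD_eq_getElem?_getD, List.getD_eq_getElem?_getD]
    rw [List.getElem?_append_left (by omega)]
    rw [List.getElem?_take_of_lt hi]
  · rw [List.getD_eq_getElem?_getD, List.getD_eq_getElem?_getD]
    rw [List.getElem?_append_right (by omega), hlt]
    rcases lt_or_ge i (n + l) with hi2 | hi2
    · rw [if_pos ⟨hi, hi2⟩]
      rw [List.getElem?_append_left (by simp; omega)]
      rw [List.getElem?_replicate, if_pos (by omega)]
      rfl
    · rw [if_neg (by omega)]
      rw [List.getElem?_append_right (by simp; omega)]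
      rw [List.getElem?_drop]
      congr 2
      simp
      omega

-- the CPython quirk findFrom keeps: a start past len(s) yields -1 even for the empty pattern
theorem pvFindFrom_past (cs w : List Char) (k : Int) (h : (cs.length : Int) < k) :
    PySem.Chars.findFrom cs w k none = -1 := by
  have h0 : ¬ k < 0 := by omega
  simp only [PySem.Chars.findFrom, h0, if_false]
  rw [if_pos (by omega)]

-- an empty word's find loop walks the whole string but never changes the mask
theorem pvFindLoop_empty (cs : List Char) :
    ∀ (fuel k : Nat) (mask : List Int), k ≤ cs.length → cs.length + 2 - k ≤ fuel →
      pvFindLoop cs [] mask (PySem.Chars.findFrom cs [] (k : Int) none) fuel = mask := by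
  intro fuel
  induction fuel with
  | zero => intro k mask hk hf; omega
  | succ f ih =>
    intro k mask hk hf
    have hfk : PySem.Chars.findFrom cs [] (k : Int) none = (k : Int) := by
      rw [PySem.Chars.findFrom_natCast cs [] k hk, PySem.Chars.find_nil]
      norm_num
    rw [hfk, pvFindLoop, if_neg (by omega)]
    simp only [List.length_nil]
    have hsl : pvSliceAssign mask (k : Int) 0 = mask := by
      rw [pvSliceAssign_eq]
      simp
    rw [hsl]
    rcases Nat.lt_or_ge k cs.length with hlt | hge
    · have : ((k : Int) + 1) = ((k + 1 : Nat) : Int) := by push_cast; ring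
      rw [this]
      exact ih (k+1) mask (by omega) (by omega)
    · rw [pvFindFrom_past cs [] ((k:Int)+1) (by omega)]
      obtain ⟨f', rfl⟩ : ∃ f', f = f' + 1 := ⟨f - 1, by omega⟩
      rw [pvFindLoop, if_pos rfl]

-- A's find loop for one nonempty word: sets exactly the positions its occurrences at indices ≥ k cover
theorem pvFindLoop_spec (cs w : List Char) (hw : w ≠ []) :
    ∀ (fuel k : Nat) (mask : List Int), k ≤ cs.length → mask.length = cs.length →
      cs.length + 1 - k ≤ fuel →
      (pvFindLoop cs w mask (PySem.Chars.findFrom cs w (k : Int) none) fuel).length = cs.length ∧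
      ∀ i, (pvFindLoop cs w mask (PySem.Chars.findFrom cs w (k : Int) none) fuel).getD i 0 ≠ 0 ↔
        (mask.getD i 0 ≠ 0 ∨ ∃ j, k ≤ j ∧ j ≤ i ∧ i < j + w.length ∧ w <+: cs.drop j) := by
  intro fuel
  induction fuel with
  | zero => intro k mask hk hm hf; omega
  | succ f ih =>
    intro k mask hk hm hf
    by_cases hneg : PySem.Chars.findFrom cs w (k : Int) none = -1
    · rw [hneg, pvFindLoop, if_pos rfl]
      refine ⟨hm, fun i => ?_⟩
      constructor
      · exact fun h => Or.inl h
      · rintro (h | ⟨j, hkj, hji, hij, hpre⟩)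
        · exact h
        · exfalso
          have hnin : ¬ w <:+: cs.drop k := (PySem.Chars.findFrom_natCast_eq_neg_one_iff cs w k hk).mp hneg
          apply hnin
          have hdd : (cs.drop k).drop (j - k) = cs.drop j := by
            rw [List.drop_drop]; congr 1; omega
          have : w <+: (cs.drop k).drop (j - k) := by rw [hdd]; exact hpre
          exact this.isInfix.trans (List.drop_suffix _ _).isInfix
    · obtain ⟨hkm, hpre, hmin⟩ := PySem.Chars.findFrom_natCast_spec cs w k hk hneg
      set m := PySem.Chars.findFrom cs w (k : Int) none with hmdef
      have hm0 : 0 ≤ m := le_trans (by exact_mod_cast Int.natCast_nonneg k) hkm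
      set n := m.toNat with hndef
      have hmn : m = (n : Int) := by omega
      have hnlen : n < cs.length := by
        by_contra hc
        have : cs.drop n = [] := List.drop_eq_nil_of_le (by omega)
        rw [this] at hpre
        exact hw (List.prefix_nil.mp hpre)
      have hwlen : n + w.length ≤ cs.length := by
        have := hpre.length_le
        simp [List.length_drop] at this
        omega
      have hkn : k ≤ n := by omega
      rw [pvFindLoop, if_neg hneg]
      rw [hmn]
      have hnext : ((n : Int) + 1) = ((n + 1 : Nat) : Int) := by push_cast; ring
      rw [hnext]
      have hm'len : (pvSliceAssign mask (n : Int) w.length).length = cs.length := by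
        rw [pvSliceAssign_length mask n w.length (by omega)]; exact hm
      obtain ⟨ihlen, ihgd⟩ := ih (n+1) (pvSliceAssign mask (n : Int) w.length) (by omega) hm'len (by omega)
      refine ⟨ihlen, fun i => ?_⟩
      rw [ihgd i]
      rw [pvSliceAssign_getD mask n w.length (by omega) i]
      constructor
      · rintro (h | ⟨j, hkj, hji, hij, hp⟩)
        · by_cases hreg : n ≤ i ∧ i < n + w.length
          · exact Or.inr ⟨n, hkn, hreg.1, hreg.2, hpre⟩
          · rw [if_neg hreg] at h; exact Or.inl h
        · exact Or.inr ⟨j, by omega, hji, hij, hp⟩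
      · rintro (h | ⟨j, hkj, hji, hij, hp⟩)
        · by_cases hreg : n ≤ i ∧ i < n + w.length
          · left; rw [if_pos hreg]; norm_num
          · left; rw [if_neg hreg]; exact h
        · rcases Nat.lt_or_ge j (n+1) with hj | hj
          · have hjn : j = n := by
              by_contra hc
              exact hmin j hkj (by omega) hp
            left
            rw [if_pos (by omega)]
            norm_num
          · exact Or.inr ⟨j, hj, hji, hij, hp⟩

theorem pvFindLoop_word (cs w : List Char) (mask : List Int) (hm : mask.length = cs.length) :
    (pvFindLoop cs w mask (PySem.Chars.find cs w) (cs.length + 2)).length = cs.length ∧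
    ∀ i, (pvFindLoop cs w mask (PySem.Chars.find cs w) (cs.length + 2)).getD i 0 ≠ 0 ↔
      (mask.getD i 0 ≠ 0 ∨ ∃ j, j ≤ i ∧ i < j + w.length ∧ w <+: cs.drop j) := by
  have hfz : PySem.Chars.find cs w = PySem.Chars.findFrom cs w ((0 : Nat) : Int) none := by
    rw [Nat.cast_zero, PySem.Chars.findFrom_zero]
  rw [hfz]
  rcases eq_or_ne w [] with rfl | hw
  · rw [pvFindLoop_empty cs (cs.length + 2) 0 mask (by omega) (by omega)]
    refine ⟨hm, fun i => ?_⟩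
    constructor
    · exact fun h => Or.inl h
    · rintro (h | ⟨j, hji, hij, _⟩)
      · exact h
      · simp only [List.length_nil, Nat.add_zero] at hij; omega
  · obtain ⟨h1, h2⟩ := pvFindLoop_spec cs w hw (cs.length + 2) 0 mask (by omega) hm (by omega)
    refine ⟨h1, fun i => ?_⟩
    rw [h2 i]
    constructor
    · rintro (h | ⟨j, _, hji, hij, hp⟩)
      · exact Or.inl h
      · exact Or.inr ⟨j, hji, hij, hp⟩
    · rintro (h | ⟨j, hji, hij, hp⟩)
      · exact Or.inl h
      · exact Or.inr ⟨j, Nat.zero_le j, hji, hij, hp⟩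

theorem pvMask_fold (cs : List Char) :
    ∀ (ws : List (List Char)) (m : List Int), m.length = cs.length →
      ((ws.foldl (fun m w => pvFindLoop cs w m (PySem.Chars.find cs w) (cs.length + 2)) m).length = cs.length ∧
       ∀ i, (ws.foldl (fun m w => pvFindLoop cs w m (PySem.Chars.find cs w) (cs.length + 2)) m).getD i 0 ≠ 0 ↔
         (m.getD i 0 ≠ 0 ∨ pvCovered cs ws i)) := by
  intro ws
  induction ws with
  | nil =>
    intro m hm
    refine ⟨hm, fun i => ?_⟩
    simp [pvCovered]
  | cons w ws ih =>
    intro m hm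
    rw [List.foldl_cons]
    obtain ⟨hw1, hw2⟩ := pvFindLoop_word cs w m hm
    obtain ⟨ih1, ih2⟩ := ih _ hw1
    refine ⟨ih1, fun i => ?_⟩
    rw [ih2 i, hw2 i]
    simp only [pvCovered, List.mem_cons]
    constructor
    · rintro ((h | ⟨j, hji, hij, hp⟩) | ⟨w', hw', hex⟩)
      · exact Or.inl h
      · exact Or.inr ⟨w, Or.inl rfl, j, hji, hij, hp⟩
      · exact Or.inr ⟨w', Or.inr hw', hex⟩
    · rintro (h | ⟨w', hw' | hw', hex⟩)
      · exact Or.inl (Or.inl h)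
      · subst hw'; exact Or.inl (Or.inr hex)
      · exact Or.inr ⟨w', hw', hex⟩

-- A's mask decides exactly pvCovered
theorem pvMask_spec (cs : List Char) (words : List (List Char)) :
    (pvMask cs words).length = cs.length ∧
      ∀ i, (pvMask cs words).getD i 0 ≠ 0 ↔ pvCovered cs words i := by
  obtain ⟨h1, h2⟩ := pvMask_fold cs words (List.replicate cs.length 0) (by simp)
  refine ⟨h1, fun i => ?_⟩
  rw [pvMask] at *
  rw [h2 i]
  simp

theorem pvExtend_le (cs : List Char) (words : List (List Char)) (i : Nat) :
    ∀ e, e ≤ pvExtend cs words i e := by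
  unfold pvExtend
  induction words with
  | nil => intro e; simp
  | cons w ws ih =>
    intro e
    rw [List.foldl_cons]
    refine le_trans ?_ (ih _)
    split <;> omega

theorem pvExtend_ge (cs : List Char) (words : List (List Char)) (i : Nat) :
    ∀ e w, w ∈ words → pvStartsAt cs w i = true → i + w.length ≤ pvExtend cs words i e := by
  unfold pvExtend
  induction words with
  | nil => intro e w h; simp at h
  | cons w' ws ih =>
    intro e w hmem hst
    rw [List.foldl_cons]
    rcases List.mem_cons.mp hmem with rfl | hmem
    · refine le_trans ?_ (pvExtend_le cs ws i _)
      by_cases hc : e < i + w.length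
      · rw [if_pos ⟨hst, hc⟩]
      · rw [if_neg (fun hh => hc hh.2)]; omega
    · exact ih _ w hmem hst

theorem pvExtend_cases (cs : List Char) (words : List (List Char)) (i : Nat) :
    ∀ e, pvExtend cs words i e = e ∨
      ∃ w ∈ words, pvStartsAt cs w i = true ∧ pvExtend cs words i e = i + w.length := by
  unfold pvExtend
  induction words with
  | nil => intro e; simp
  | cons w ws ih =>
    intro e
    rw [List.foldl_cons]
    by_cases h : pvStartsAt cs w i = true ∧ e < i + w.length
    · rw [if_pos h]
      rcases ih (i + w.length) with heq | ⟨w', hw', hst, heq⟩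
      · exact Or.inr ⟨w, List.mem_cons_self .., h.1, heq⟩
      · exact Or.inr ⟨w', List.mem_cons_of_mem _ hw', hst, heq⟩
    · rw [if_neg h]
      rcases ih e with heq | ⟨w', hw', hst, heq⟩
      · exact Or.inl heq
      · exact Or.inr ⟨w', List.mem_cons_of_mem _ hw', hst, heq⟩

theorem pvInv_zero (cs : List Char) (words : List (List Char)) : pvInv cs words 0 0 :=
  ⟨fun _ _ _ h _ => absurd h (by omega), Or.inl rfl⟩

theorem pvInv_step (cs : List Char) (words : List (List Char)) (k e : Nat)
    (h : pvInv cs words k e) : pvInv cs words (k + 1) (pvExtend cs words k e) := by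
  obtain ⟨h1, h2⟩ := h
  constructor
  · intro w hw j hj hp
    rcases Nat.lt_or_ge j k with hjk | hjk
    · exact le_trans (h1 w hw j hjk hp) (pvExtend_le cs words k e)
    · have hjeq : j = k := by omega
      subst hjeq
      exact pvExtend_ge cs words j e w hw (by
        unfold pvStartsAt
        exact (PySem.Chars.startswith_iff _ _).mpr hp)
  · rcases pvExtend_cases cs words k e with heq | ⟨w, hw, hst, heq⟩
    · rw [heq]
      rcases h2 with h2 | ⟨w, hw, j, hj, hp, he⟩
      · exact Or.inl h2
      · exact Or.inr ⟨w, hw, j, by omega, hp, he⟩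
    · refine Or.inr ⟨w, hw, k, by omega, ?_, heq⟩
      exact (PySem.Chars.startswith_iff _ _).mp hst

-- B's bold flag at position k decides exactly pvCovered
theorem pvCur_iff (cs : List Char) (words : List (List Char)) (k e : Nat)
    (h : pvInv cs words k e) : (k < pvExtend cs words k e) ↔ pvCovered cs words k := by
  obtain ⟨h1, h2⟩ := h
  constructor
  · intro hlt
    rcases pvExtend_cases cs words k e with heq | ⟨w, hw, hst, heq⟩
    · rw [heq] at hlt
      rcases h2 with rfl | ⟨w, hw, j, hj, hp, he⟩
      · omega
      · exact ⟨w, hw, j, by omega, by omega, hp⟩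
    · exact ⟨w, hw, k, le_refl k, by omega, (PySem.Chars.startswith_iff _ _).mp hst⟩
  · rintro ⟨w, hw, j, hjk, hkj, hp⟩
    rcases Nat.lt_or_ge j k with hjk' | hjk'
    · have := h1 w hw j hjk' hp
      have := pvExtend_le cs words k e
      omega
    · have hjeq : j = k := by omega
      subst hjeq
      have := pvExtend_ge cs words j e w hw ((PySem.Chars.startswith_iff _ _).mpr hp)
      omega

-- the heart of the equivalence: B's sweep from k equals a possibly pending close tag plus A's render from k
theorem pvRender_main (cs : List Char) (words : List (List Char)) :
    ∀ (d k e : Nat) (prev : Bool), cs.length - k = d → k ≤ cs.length →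
      pvInv cs words k e → (prev = true ↔ (0 < k ∧ pvCovered cs words (k - 1))) →
      pvRenderB cs words k e prev =
        (if prev = true ∧ (k = cs.length ∨ ¬ (pvMask cs words).getD k 0 ≠ 0) then ["</b>"] else [])
          ++ pvRenderA cs (pvMask cs words) k := by
  intro d
  induction d with
  | zero =>
    intro k e prev hd hk hinv hprev
    have hkl : k = cs.length := by omega
    subst hkl
    rw [pvRenderB, dif_neg (by omega), pvRenderA, dif_neg (by omega)]
    by_cases hp : prev = true
    · rw [if_pos hp, if_pos ⟨hp, Or.inl rfl⟩, List.append_nil]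
    · rw [if_neg hp, if_neg (fun hh => hp hh.1), List.append_nil]
  | succ d ih =>
    intro k e prev hd hk hinv hprev
    have hkl : k < cs.length := by omega
    obtain ⟨hmlen, hmgd⟩ := pvMask_spec cs words
    have hcur : (decide (k < pvExtend cs words k e) = true) ↔ pvCovered cs words k := by
      rw [decide_eq_true_iff]; exact pvCur_iff cs words k e hinv
    have hmk : (pvMask cs words).getD k 0 ≠ 0 ↔ pvCovered cs words k := hmgd k
    have hIH := ih (k+1) (pvExtend cs words k e) (decide (k < pvExtend cs words k e))
      (by omega) (by omega) (pvInv_step cs words k e hinv)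
      (by simp only [Nat.add_sub_cancel]; constructor
          · intro h; exact ⟨by omega, hcur.mp h⟩
          · intro h; exact hcur.mpr h.2)
    rw [pvRenderB, dif_pos hkl, pvRenderA, dif_pos hkl, hIH]
    -- normalize A's pyGetD indexing to List.getD
    have e1 : PySem.List.pyGetD (pvMask cs words) ((k : Nat) : Int) 0 = (pvMask cs words).getD k 0 :=
      PySem.List.pyGetD_natCast _ _ _
    have e3 : PySem.List.pyGetD (pvMask cs words) (((k : Nat) : Int) + 1) 0 = (pvMask cs words).getD (k+1) 0 := by
      have hc : ((k : Int) + 1) = (((k+1 : Nat)) : Int) := by push_cast; ring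
      rw [hc]; exact PySem.List.pyGetD_natCast _ _ _
    rw [e1, e3]
    have hclose :
        (if decide (k < pvExtend cs words k e) = true ∧ (k + 1 = cs.length ∨ ¬ (pvMask cs words).getD (k+1) 0 ≠ 0)
          then (["</b>"] : List String) else []) =
        (if (pvMask cs words).getD k 0 ≠ 0 ∧ (k = cs.length - 1 ∨ ¬ (pvMask cs words).getD (k+1) 0 ≠ 0)
          then (["</b>"] : List String) else []) := by
      apply if_congr _ rfl rfl
      constructor
      · rintro ⟨h1, h2⟩
        refine ⟨hmk.mpr (hcur.mp h1), ?_⟩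
        rcases h2 with h2 | h2
        · exact Or.inl (by omega)
        · exact Or.inr h2
      · rintro ⟨h1, h2⟩
        refine ⟨hcur.mpr (hmk.mp h1), ?_⟩
        rcases h2 with h2 | h2
        · exact Or.inl (by omega)
        · exact Or.inr h2
    have hfront :
        (if decide (k < pvExtend cs words k e) = true ∧ ¬ prev = true then (["<b>"] : List String)
          else if prev = true ∧ ¬ decide (k < pvExtend cs words k e) = true then ["</b>"] else []) =
        (if prev = true ∧ (k = cs.length ∨ ¬ (pvMask cs words).getD k 0 ≠ 0) then (["</b>"] : List String) else [])
          ++ (if (pvMask cs words).getD k 0 ≠ 0 ∧ (k = 0 ∨ ¬ PySem.List.pyGetD (pvMask cs words) ((k : Int) - 1) 0 ≠ 0)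
              then (["<b>"] : List String) else []) := by
      by_cases hC : pvCovered cs words k
      · by_cases hp : prev = true
        · rw [if_neg (fun hh => hh.2 hp),
              if_neg (fun hh => hh.2 (hcur.mpr hC)),
              if_neg (fun hh => (hh.2.resolve_left (by omega)) (hmk.mpr hC))]
          obtain ⟨hk0, hCp⟩ := hprev.mp hp
          have e2 : PySem.List.pyGetD (pvMask cs words) ((k : Int) - 1) 0 = (pvMask cs words).getD (k-1) 0 := by
            have hc : ((k : Int) - 1) = (((k - 1 : Nat)) : Int) := by omega
            rw [hc]; exact PySem.List.pyGetD_natCast _ _ _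
          rw [e2, if_neg (fun hh => (hh.2.resolve_left (by omega)) ((hmgd (k-1)).mpr hCp))]
          rfl
        · rw [if_pos ⟨hcur.mpr hC, hp⟩, if_neg (fun hh => hp hh.1)]
          by_cases hk0 : k = 0
          · rw [if_pos ⟨hmk.mpr hC, Or.inl hk0⟩]; rfl
          · have hnc : ¬ pvCovered cs words (k - 1) := fun hc => hp (hprev.mpr ⟨by omega, hc⟩)
            have e2 : PySem.List.pyGetD (pvMask cs words) ((k : Int) - 1) 0 = (pvMask cs words).getD (k-1) 0 := by
              have hc : ((k : Int) - 1) = (((k - 1 : Nat)) : Int) := by omega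
              rw [hc]; exact PySem.List.pyGetD_natCast _ _ _
            rw [e2, if_pos ⟨hmk.mpr hC, Or.inr (fun hh => hnc ((hmgd (k-1)).mp hh))⟩]
            rfl
      · by_cases hp : prev = true
        · rw [if_neg (fun hh => hC (hcur.mp hh.1)),
              if_pos ⟨hp, fun hh => hC (hcur.mp hh)⟩,
              if_pos ⟨hp, Or.inr (fun hh => hC (hmk.mp hh))⟩,
              if_neg (fun hh => hC (hmk.mp hh.1))]
          rfl
        · rw [if_neg (fun hh => hC (hcur.mp hh.1)), if_neg (fun hh => hp hh.1),
              if_neg (fun hh => hp hh.1), if_neg (fun hh => hC (hmk.mp hh.1))]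
          rfl
    rw [hclose] at *
    rw [hfront]
    simp [List.append_assoc]

theorem pvRender_eq (cs : List Char) (words : List (List Char)) :
    pvRenderB cs words 0 0 false = pvRenderA cs (pvMask cs words) 0 := by
  have h := pvRender_main cs words (cs.length - 0) 0 0 false rfl (by omega)
    (pvInv_zero cs words) (by simp)
  rw [h, if_neg (by simp)]
  rfl

-- ===== VERDICT (by name: the statement is the Claim_ definition above) =====
theorem boldWords_spec : Claim_equal_boldWords := by
  intro words S _
  unfold Spec_boldWords boldWords boldWords_alt
  rw [pvRender_eq]
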